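-- pv_equiv track=rewrite | github.com/sarthakdev143-lite/shadow-poem-generator | shadow.py | _collect_no_repeat_ngram_bans
-- ===== SOURCE A (Python) =====
-- from typing import Dict, List, Optional, Sequence, Set, Tuple
--
-- def _collect_no_repeat_ngram_bans(history: List[int], no_repeat_ngram: int) -> Set[int]:
--     if no_repeat_ngram <= 1:
--         return set()
--     prefix_len = no_repeat_ngram - 1
--     if len(history) < prefix_len:
--         return set()
--
--     target_prefix = tuple(history[-prefix_len:])
--     banned: Set[int] = set()
--     for i in range(0, len(history) - no_repeat_ngram + 1):
--         if tuple(history[i : i + prefix_len]) == target_prefix: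
--             banned.add(history[i + prefix_len])
--     return banned
-- ===== SOURCE B (Python) =====
-- from typing import List, Set
--
-- def _collect_no_repeat_ngram_bans(history: List[int], no_repeat_ngram: int) -> Set[int]:
--     if no_repeat_ngram <= 1:
--         return set()
--     plen = no_repeat_ngram - 1
--     n = len(history)
--     if n < plen:
--         return set()
--     target = history[n - plen:]
--     # staged candidate filtering: start with every window start, then one pass
--     # per target position narrows the surviving starts by a single-element test
--     candidates = list(range(n - plen))
--     for off, t in enumerate(target):
--         candidates = [i for i in candidates if history[i + off] == t]
--     banned: Set[int] = set()
--     for i in candidates: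
--         banned.add(history[i + plen])
--     return banned
-- ===== Notes on version B (the rewrite author's own statement) =====
-- stated objective: alternative
-- what changed: A slices out each length-(k-1) window and compares it whole against the target suffix in one loop; B never builds or compares a window: it keeps a candidate list of window starts and runs one narrowing pass per target position (staged filtering by a single-element test), then collects the followers of the surviving starts.
import Mathlib
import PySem

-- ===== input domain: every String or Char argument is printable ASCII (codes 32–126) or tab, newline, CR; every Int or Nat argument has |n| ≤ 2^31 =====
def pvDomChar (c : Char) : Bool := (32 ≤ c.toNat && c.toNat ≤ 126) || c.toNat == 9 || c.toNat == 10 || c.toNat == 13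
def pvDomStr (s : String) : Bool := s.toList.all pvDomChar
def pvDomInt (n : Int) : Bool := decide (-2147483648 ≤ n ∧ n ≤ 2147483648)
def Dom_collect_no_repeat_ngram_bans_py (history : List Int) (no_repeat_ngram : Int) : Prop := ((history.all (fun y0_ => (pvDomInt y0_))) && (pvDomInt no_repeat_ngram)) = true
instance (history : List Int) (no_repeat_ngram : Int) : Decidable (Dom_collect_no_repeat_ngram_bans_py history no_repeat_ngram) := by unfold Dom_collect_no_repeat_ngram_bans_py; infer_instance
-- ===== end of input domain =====

-- B replaces A's per-window slice comparison by staged candidate filtering: one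
-- narrowing pass over the window starts per target position, then collect the
-- followers of the survivors (objective: alternative).


-- ===== PORT A =====
-- literal transliteration of A: scan all window starts, compare the window slice to
-- the target prefix, collect the following token into a set.
-- history[i + prefix_len] is always in range inside the loop (i ≤ len - no_repeat_ngram),
-- so pyGetD with a default is exact there.
def collect_no_repeat_ngram_bans_py (history : List Int) (no_repeat_ngram : Int) : List Int :=
  if no_repeat_ngram ≤ 1 then PySem.Set.empty
  else
    let prefix_len := no_repeat_ngram - 1
    if (history.length : Int) < prefix_len then PySem.Set.empty
    else
      let target_prefix := PySem.List.slice history (some (-prefix_len)) none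
      (PySem.List.pyRange 0 ((history.length : Int) - no_repeat_ngram + 1) 1).foldl
        (fun banned i =>
          if PySem.List.slice history (some i) (some (i + prefix_len)) = target_prefix then
            PySem.Set.add banned (PySem.List.pyGetD history (i + prefix_len) 0)
          else banned)
        PySem.Set.empty

-- ===== PORT B =====
-- literal transliteration of B: candidates = all window starts; one filtering pass per
-- enumerated target position keeps only starts whose window still matches; finally the
-- follower history[i + plen] of each surviving start is added to the set.
-- history[i + off] and history[i + plen] are always in range there (i < len - plen,
-- off < plen), so pyGetD with a default is exact.
def collect_no_repeat_ngram_bans_py_alt (history : List Int) (no_repeat_ngram : Int) : List Int :=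
  if no_repeat_ngram ≤ 1 then PySem.Set.empty
  else
    let plen := no_repeat_ngram - 1
    let n : Int := history.length
    if n < plen then PySem.Set.empty
    else
      let target := PySem.List.slice history (some (n - plen)) none
      let candidates :=
        (PySem.List.enumerate target 0).foldl
          (fun cs p => cs.filter (fun i => PySem.List.pyGetD history (i + p.1) 0 == p.2))
          (PySem.List.pyRange 0 (n - plen) 1)
      candidates.foldl
        (fun banned i => PySem.Set.add banned (PySem.List.pyGetD history (i + plen) 0))
        PySem.Set.empty

-- ===== PRECONDITION & SPEC =====
def Spec_collect_no_repeat_ngram_bans_py (history : List Int) (no_repeat_ngram : Int) (out : List Int) : Prop := out = collect_no_repeat_ngram_bans_py_alt history no_repeat_ngram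
instance (history : List Int) (no_repeat_ngram : Int) (out : List Int) : Decidable (Spec_collect_no_repeat_ngram_bans_py history no_repeat_ngram out) := by unfold Spec_collect_no_repeat_ngram_bans_py; infer_instance

-- ===== CLAIM (what is proved, stated in full; the proofs are below) =====
def Claim_equal_collect_no_repeat_ngram_bans_py : Prop := ∀ (history : List Int) (no_repeat_ngram : Int), Dom_collect_no_repeat_ngram_bans_py history no_repeat_ngram → Spec_collect_no_repeat_ngram_bans_py history no_repeat_ngram (collect_no_repeat_ngram_bans_py history no_repeat_ngram)

-- ===== LEMMAS AND PROOFS =====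

-- Staged filtering collapses to one filter by the conjunction of all stage tests.
theorem pv_staged_filter (L : List (Int × Int)) (pred : Int → Int × Int → Bool) :
    ∀ (cs : List Int),
      L.foldl (fun cs p => cs.filter (fun i => pred i p)) cs
        = cs.filter (fun i => L.all (fun p => pred i p)) := by
  induction L with
  | nil => intro cs; simp
  | cons hd tl ih =>
    intro cs
    simp only [List.foldl_cons, ih, List.filter_filter]
    apply List.filter_congr
    intro x _
    simp [Bool.and_comm]

-- A window slice equals a list of the same length iff it matches pointwise.
theorem pv_take_drop_eq_iff (xs : List Int) (iN pN : Nat) (h : iN + pN ≤ xs.length)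
    (T : List Int) (hT : T.length = pN) :
    ((xs.drop iN).take pN = T) ↔ ∀ k, (h2 : k < pN) → xs[iN+k]'(by omega) = T[k]'(by omega) := by
  constructor
  · intro he k hk
    have := congrArg (fun l => l[k]?) he
    simp [hk, List.getElem?_drop,
      List.getElem?_eq_getElem (by omega : iN + k < xs.length),
      List.getElem?_eq_getElem (by omega : k < T.length)] at this
    exact this
  · intro hp
    apply List.ext_getElem
    · simp [hT]; omega
    · intro k h1 h2
      have hk : k < pN := by simpa [hT] using h2
      simpa [List.getElem_take, List.getElem_drop] using hp k hk

-- ===== VERDICT (by name: the statement is the Claim_ definition above) =====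
theorem collect_no_repeat_ngram_bans_py_spec : Claim_equal_collect_no_repeat_ngram_bans_py := by
  intro history no_repeat_ngram _
  unfold Spec_collect_no_repeat_ngram_bans_py
  unfold collect_no_repeat_ngram_bans_py collect_no_repeat_ngram_bans_py_alt
  by_cases h1 : no_repeat_ngram ≤ 1
  · simp [h1]
  · simp only [h1, if_false]
    by_cases h2 : (history.length : Int) < no_repeat_ngram - 1
    · simp [h2]
    · simp only [h2, if_false]
      set plen : Int := no_repeat_ngram - 1 with hplen
      set n : Int := (history.length : Int) with hn
      have hp1 : 1 ≤ plen := by omega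
      have hpn : plen ≤ n := by omega
      -- the two targets are the same list
      have hdrop : (n - plen).toNat + plen.toNat = history.length := by omega
      have htA : PySem.List.slice history (some (-plen)) none
          = history.drop (n - plen).toNat := by
        rw [PySem.List.slice_some_none]
        congr 1
        simp only [PySem.List.clampIdx]
        split_ifs with c1 c2 <;> omega
      have htB : PySem.List.slice history (some (n - plen)) none
          = history.drop (n - plen).toNat := by
        rw [PySem.List.slice_some_none]
        congr 1
        simp only [PySem.List.clampIdx]
        split_ifs with c1 c2 <;> omega
      set T : List Int := history.drop (n - plen).toNat with hTdef
      have hTlen : T.length = plen.toNat := by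
        simp [hTdef]; omega
      have hrange : n - no_repeat_ngram + 1 = n - plen := by omega
      rw [htA, htB, hrange, pv_staged_filter,
        PySem.List.foldl_ite_eq_foldl_filter (fun i => PySem.List.slice history (some i) (some (i + plen)) = T)]
      congr 1
      apply List.filter_congr
      intro i hi
      rw [PySem.List.mem_pyRange_one] at hi
      obtain ⟨hi0, hi1⟩ := hi
      have hsl : PySem.List.slice history (some i) (some (i + plen))
          = (history.drop i.toNat).take plen.toNat := by
        rw [PySem.List.slice_toNat history hi0 (by omega)]
        congr 1
        omega
      have hbound : i.toNat + plen.toNat ≤ history.length := by omega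
      rw [hsl]
      rw [Bool.eq_iff_iff, decide_eq_true_iff, List.all_eq_true,
        pv_take_drop_eq_iff history i.toNat plen.toNat hbound T hTlen]
      constructor
      · intro hpt p hp
        rw [PySem.List.mem_enumerate_iff] at hp
        obtain ⟨k, hk, rfl⟩ := hp
        have hk' : k < plen.toNat := by omega
        simp only [beq_iff_eq]
        rw [PySem.List.pyGetD_eq_getElem history 0 (by omega) (by omega)]
        have he : ((i + (0 + (k:Int))).toNat) = i.toNat + k := by omega
        simpa only [he] using hpt k hk'
      · intro hpt k hk
        have hmem : ((0 + (k:Int)), T[k]'(by omega)) ∈ PySem.List.enumerate T 0 := by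
          rw [PySem.List.mem_enumerate_iff]
          exact ⟨k, by omega, rfl⟩
        have := hpt _ hmem
        simp only [beq_iff_eq] at this
        rw [PySem.List.pyGetD_eq_getElem history 0 (by omega) (by omega)] at this
        have he : ((i + (0 + (k:Int))).toNat) = i.toNat + k := by omega
        simpa only [he] using this
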